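-- pv_equiv track=rewrite | github.com/JiaweiTong1/Password-evaluation- | check_robustness.py | password_not_same_username
-- ===== SOURCE A (Python) =====
-- def password_not_same_username(username: str, password: str) -> tuple[bool, str]:
--     """
--     Check password not same as username, if 5 consecutive characters overlap with username, return false
--     Examples:
--         >>> password_not_same_username('carrieT0112', 'carrie8eu')
--         (False, 'Password cannot be the same as username.')
--         >>> password_not_same_username('carrie', 'carrie8eu')
--         (False, 'Password cannot be the same as username.')
--         >>> password_not_same_username('carTrie0112', 'carrie8eu')
--         (True, 'Password is not the same as username.')
--         >>> password_not_same_username('jIIWET0112', 'carrie8eu')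
--         (True, 'Password is not the same as username.')
--         >>> password_not_same_username('njknjno', 'bhj,kjnilioT')
--         (True, 'Password is not the same as username.')
--     """
--     count_overlap = 0
--     for char in range(len(password) - 4):
--         substring = password[char:char + 5]
--         if substring in username:
--             count_overlap += 1
--
--     if count_overlap >= 1:
--         return False, "Password cannot be the same as username."
--     return True, "Password is not the same as username."
-- ===== SOURCE B (Python) =====
-- def password_not_same_username(username: str, password: str) -> tuple[bool, str]:
--     pset = {password[i:i + 5] for i in range(len(password) - 4)}
--     uset = {username[i:i + 5] for i in range(len(username) - 4)}
--     if not pset.isdisjoint(uset):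
--         return False, "Password cannot be the same as username."
--     return True, "Password is not the same as username."
-- ===== Notes on version B (the rewrite author's own statement) =====
-- stated objective: simpler
-- what changed: Replaced the window loop that runs a substring search of each 5-char password window inside username by building the set of 5-grams of each string once and returning on a single set-disjointness test.
import Mathlib
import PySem

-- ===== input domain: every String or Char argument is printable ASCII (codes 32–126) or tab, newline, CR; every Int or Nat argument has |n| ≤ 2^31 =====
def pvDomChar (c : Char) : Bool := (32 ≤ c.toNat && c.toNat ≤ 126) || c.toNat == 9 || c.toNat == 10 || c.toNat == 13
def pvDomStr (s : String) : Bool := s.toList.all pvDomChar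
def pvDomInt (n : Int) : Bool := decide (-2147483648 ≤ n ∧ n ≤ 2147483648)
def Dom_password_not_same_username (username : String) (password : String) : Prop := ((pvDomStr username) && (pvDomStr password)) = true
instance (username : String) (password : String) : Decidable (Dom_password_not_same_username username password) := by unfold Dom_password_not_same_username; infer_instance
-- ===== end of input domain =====

-- B replaces A's window loop with substring search by two 5-gram set builds and one set-disjointness test (objective: simpler).


-- ===== PORT A =====
def password_not_same_username (username : String) (password : String) : Bool × String :=
  let count_overlap : Int :=
    (PySem.List.pyRange 0 (PySem.Str.len password - 4) 1).foldl
      (fun acc char =>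
        let substring := PySem.Str.slice password (some char) (some (char + 5))
        if PySem.Str.isIn substring username then acc + 1 else acc) 0
  if count_overlap ≥ 1 then (false, "Password cannot be the same as username.")
  else (true, "Password is not the same as username.")

-- ===== PORT B =====
-- 5-gram sets (Python set of str → PySem.Set String); shared-gram test = not isdisjoint
def pvGrams (s : String) : PySem.Set String :=
  PySem.Set.ofList ((List.range (s.toList.length - 4)).map
    (fun (i : Nat) => PySem.Str.slice s (some (i : Int)) (some ((i : Int) + 5))))

def password_not_same_username_alt (username : String) (password : String) : Bool × String :=
  let pset := pvGrams password
  let uset := pvGrams username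
  if !(PySem.Set.isdisjoint pset uset) then (false, "Password cannot be the same as username.")
  else (true, "Password is not the same as username.")

-- ===== PRECONDITION & SPEC =====
def Spec_password_not_same_username (username : String) (password : String) (out : Bool × String) : Prop := out = password_not_same_username_alt username password
instance (username : String) (password : String) (out : Bool × String) : Decidable (Spec_password_not_same_username username password out) := by unfold Spec_password_not_same_username; infer_instance

-- ===== CLAIM (what is proved, stated in full; the proofs are below) =====
def Claim_equal_password_not_same_username : Prop := ∀ (username : String) (password : String), Dom_password_not_same_username username password → Spec_password_not_same_username username password (password_not_same_username username password)

-- ===== LEMMAS AND PROOFS =====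

-- a length-5 list occurs as a contiguous substring of u iff it is one of u's 5-grams
lemma gram_isIn_iff (g u : List Char) (hg : g.length = 5) :
    PySem.Chars.isIn g u = true ↔ ∃ j < u.length - 4, (u.drop j).take 5 = g := by
  rw [← PySem.Chars.exists_prefix_drop_iff_isIn]
  constructor
  · rintro ⟨j, hpre⟩
    have hlen : g.length ≤ (u.drop j).length := hpre.length_le
    simp only [List.length_drop, hg] at hlen
    refine ⟨j, by omega, ?_⟩
    have := List.prefix_iff_eq_take.mp hpre
    rw [hg] at this
    exact this.symm
  · rintro ⟨j, _, htake⟩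
    exact ⟨j, htake ▸ List.take_prefix 5 (u.drop j)⟩

-- toList of a 5-gram slice, on the list level
lemma toList_gram (s : String) (k : Nat) :
    (PySem.Str.slice s (some (k : Int)) (some ((k : Int) + 5))).toList
      = (s.toList.drop k).take 5 := by
  have h5 : ((k : Int) + 5) = ((k : Int) + ((5 : Nat) : Int)) := by norm_num
  rw [PySem.Str.toList_slice, PySem.Chars.slice_eq_listSlice, h5,
    PySem.List.slice_natCast_add]

-- a string gram of B's comprehension, on the list level
lemma mem_grams_iff (s g : String) :
    g ∈ pvGrams s ↔ ∃ j < s.toList.length - 4, (s.toList.drop j).take 5 = g.toList := by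
  unfold pvGrams
  constructor
  · intro h
    obtain ⟨j, hj, hEq⟩ := List.mem_map.mp ((PySem.Set.mem_ofList _ _).mp h)
    exact ⟨j, List.mem_range.mp hj, by rw [← hEq, toList_gram]⟩
  · rintro ⟨j, hj, htake⟩
    exact (PySem.Set.mem_ofList _ _).mpr (List.mem_map.mpr
      ⟨j, List.mem_range.mpr hj,
        String.toList_inj.mp (by rw [toList_gram]; exact htake)⟩)

-- A's window condition at index k equals "shared 5-gram" once k is in range
lemma cond_iff (u p : String) (k : Nat) (hk : k < p.toList.length - 4) :
    PySem.Str.isIn (PySem.Str.slice p (some (k : Int)) (some ((k : Int) + 5))) u = true ↔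
    ∃ j < u.toList.length - 4,
      (u.toList.drop j).take 5 = (p.toList.drop k).take 5 := by
  have hsl := toList_gram p k
  have hlen : ((p.toList.drop k).take 5).length = 5 := by
    simp only [List.length_take, List.length_drop]
    omega
  rw [PySem.Str.isIn_iff_infix, hsl, ← PySem.Chars.isIn_iff_infix,
    gram_isIn_iff _ _ hlen]

theorem password_not_same_username_spec : Claim_equal_password_not_same_username := by
  intro username password _
  unfold Spec_password_not_same_username password_not_same_username password_not_same_username_alt
  rw [PySem.List.foldl_count_if]
  have key : ((0 : Int) + ↑(List.countP
        (fun char => PySem.Str.isIn (PySem.Str.slice password (some char) (some (char + 5))) username)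
        (PySem.List.pyRange 0 (PySem.Str.len password - 4) 1)) ≥ 1)
      ↔ (!(PySem.Set.isdisjoint (pvGrams password) (pvGrams username))) = true := by
    rw [Bool.not_eq_eq_eq_not, Bool.not_true, ← Bool.not_eq_true, PySem.Set.isdisjoint_iff]
    push Not
    constructor
    · intro h
      have hpos : 0 < List.countP
          (fun char => PySem.Str.isIn (PySem.Str.slice password (some char) (some (char + 5))) username)
          (PySem.List.pyRange 0 (PySem.Str.len password - 4) 1) := by omega
      obtain ⟨x, hx, hcond⟩ := List.countP_pos_iff.mp hpos
      obtain ⟨hx0, hxlt⟩ := PySem.List.mem_pyRange_one.mp hx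
      have hlen := PySem.Str.len_eq password
      set k := x.toNat with hkdef
      have hxk : x = (k : Int) := by omega
      have hk : k < password.toList.length - 4 := by
        rw [hlen] at hxlt; omega
      rw [hxk] at hcond
      obtain ⟨j, hj, hge⟩ := (cond_iff username password k hk).mp hcond
      refine ⟨PySem.Str.slice password (some (k : Int)) (some ((k : Int) + 5)), ?_, ?_⟩
      · exact (mem_grams_iff password _).mpr ⟨k, hk, by rw [toList_gram]⟩
      · exact (mem_grams_iff username _).mpr ⟨j, hj, by rw [toList_gram]; exact hge⟩
    · rintro ⟨g, hgp, hgu⟩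
      obtain ⟨k, hk, hkeq⟩ := (mem_grams_iff password g).mp hgp
      obtain ⟨j, hj, hjeq⟩ := (mem_grams_iff username g).mp hgu
      have hcond : PySem.Str.isIn (PySem.Str.slice password (some (k : Int)) (some ((k : Int) + 5))) username = true :=
        (cond_iff username password k hk).mpr ⟨j, hj, by rw [hjeq, hkeq]⟩
      have hmem : (k : Int) ∈ PySem.List.pyRange 0 (PySem.Str.len password - 4) 1 := by
        rw [PySem.List.mem_pyRange_one, PySem.Str.len_eq]
        constructor <;> [positivity; omega]
      have hpos : 0 < List.countP
          (fun char => PySem.Str.isIn (PySem.Str.slice password (some char) (some (char + 5))) username)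
          (PySem.List.pyRange 0 (PySem.Str.len password - 4) 1) :=
        List.countP_pos_iff.mpr ⟨(k : Int), hmem, by exact hcond⟩
      omega
  by_cases h : (0 : Int) + ↑(List.countP
        (fun char => PySem.Str.isIn (PySem.Str.slice password (some char) (some (char + 5))) username)
        (PySem.List.pyRange 0 (PySem.Str.len password - 4) 1)) ≥ 1
  · rw [if_pos h, if_pos (key.mp h)]
  · rw [if_neg h, if_neg (fun hb => h (key.mpr hb))]
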